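-- pv_equiv track=rewrite | github.com/Alecklf09123/Program-for-encryption-decryption-and-cryptanalysis | Brute_force_search_S_block_3x3/Метод полного перебора S-блок 3x3 (многопоточный)/perebor s-block 3x3.py | xor_mes
-- ===== SOURCE A (Python) =====
-- def xor_mes(inpstr, key ):
--     bits=[]
--     string=[]
--     afterxor=[]
--     #Добавляем нули к введенной строке
--     while (len(inpstr))%(len(key))!=0:
--         inpstr = '0' + inpstr
--     #Ключ, равный длинне сообщения
--     key=int((len(inpstr)/len(key)))*key
--     afterxor=(bin(int(inpstr,2)^int(key,2)))[2:]
--     while len(inpstr)!=len(afterxor):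
--         afterxor='0'+afterxor
--     return afterxor
-- ===== SOURCE B (Python) =====
-- def xor_mes(inpstr, key):
--     if not inpstr or not key:
--         raise ValueError('expected nonempty bit strings')
--     if any(c not in '01' for c in inpstr) or any(c not in '01' for c in key):
--         raise ValueError('expected nonempty bit strings')
--     bits = '0' * (-len(inpstr) % len(key)) + inpstr
--     rep = key * (len(bits) // len(key))
--     return ''.join('1' if b != k else '0' for b, k in zip(bits, rep))
-- ===== Notes on version B (the rewrite author's own statement) =====
-- stated objective: simpler
-- what changed: B zero-pads the input, repeats the key to the same length and XORs the strings character by character, instead of converting both to big integers, XOR-ing once and re-padding bin()'s output in a loop; Pre_ excludes empty strings (A raises ValueError/ZeroDivisionError) and strings with any character other than '0'/'1', where int(_,2)'s literal grammar makes A raise ValueError or return an accidental value ('+', '0b', underscores, whitespace, a '-' sign can even leave a 'b' in A's output) while B raises ValueError.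
-- outside the precondition, e.g. on xor_mes('+1', '1'): A returns '10', B raises ValueError; on xor_mes('-01', '001'): A returns 'b10', B raises ValueError
import Mathlib
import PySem

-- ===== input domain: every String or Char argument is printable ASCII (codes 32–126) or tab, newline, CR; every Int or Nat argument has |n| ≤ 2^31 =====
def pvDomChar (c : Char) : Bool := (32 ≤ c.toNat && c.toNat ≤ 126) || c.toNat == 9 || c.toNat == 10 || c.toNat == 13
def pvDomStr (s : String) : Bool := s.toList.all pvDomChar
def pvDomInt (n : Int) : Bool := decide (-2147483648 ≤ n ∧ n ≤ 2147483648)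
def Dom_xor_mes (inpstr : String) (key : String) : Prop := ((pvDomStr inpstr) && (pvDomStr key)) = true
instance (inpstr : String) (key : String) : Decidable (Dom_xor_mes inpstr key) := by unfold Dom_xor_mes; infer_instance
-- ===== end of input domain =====

-- B replaces A's big-integer round-trip (int(...,2), one ^, bin(), re-pad loop) by a direct
-- per-character XOR of the zero-padded input with the key repeated to the same length.

-- ===== PORT A =====

-- A-side helpers: the exact literal grammar of Python's int(s, 2) on the ASCII domain
-- (optional whitespace, optional sign, optional '0b'/'0B' prefix, '0'/'1' digits with single
-- underscores between digits; '-' handled as none since Pre_ admits only '0'/'1' strings,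
-- on which a sign never occurs).
def pvIsWS (c : Char) : Bool := c = ' ' || c = '\t' || c = '\n' || c = '\r'

-- s.strip() (exact on the ASCII domain: the only Python whitespace there is ' \t\n\r')
def stripWS (s : List Char) : List Char :=
  ((s.dropWhile pvIsWS).reverse.dropWhile pvIsWS).reverse

-- the digit scan: prevOk = an underscore may come next, hasDigit = a digit was seen
def digitsCore (l : List Char) (prevOk : Bool) (hasDigit : Bool) : Option (List Char) :=
  match l with
  | [] => if hasDigit && prevOk then some [] else none
  | c :: t =>
    if c = '0' ∨ c = '1' then (digitsCore t true true).map (c :: ·)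
    else if c = '_' then (if prevOk then digitsCore t false hasDigit else none)
    else none

-- the optional '0b'/'0B' prefix, then the digit scan
def pvDigitsAux (t1 : List Char) : Option (List Char) :=
  if t1.take 2 = ['0', 'b'] ∨ t1.take 2 = ['0', 'B'] then digitsCore (t1.drop 2) true false
  else digitsCore t1 false false

-- none = ValueError
def pvDigits? (s : List Char) : Option (List Char) :=
  pvDigitsAux (if (stripWS s).head? = some '+' then (stripWS s).tail else stripWS s)

-- the numeric value of a binary digit string
def parseBin (s : List Char) : Nat :=
  s.foldl (fun a c => 2 * a + (if c = '1' then 1 else 0)) 0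

-- int(s, 2) (hand port; exact on Pre_, whose literals are nonnegative; none ↦ 0 is the
-- ValueError case, excluded by Pre_)
def intBin (s : List Char) : Nat :=
  match pvDigits? s with
  | some d => parseBin d
  | none => 0

-- the digit-producing part of bin(n) (hand port; exact for n > 0)
def toBinAux (n : Nat) (acc : List Char) : List Char :=
  if n = 0 then acc
  else toBinAux (n / 2) ((if n % 2 = 1 then '1' else '0') :: acc)
  termination_by n
  decreasing_by exact Nat.div_lt_self (Nat.pos_of_ne_zero (by assumption)) (by norm_num)

-- bin(n)[2:] (hand port; exact for n ≥ 0, which is all that A feeds it on Pre_)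
def toBin (n : Nat) : List Char := if n = 0 then ['0'] else toBinAux n []

-- arithmetic fact behind A's first padding loop: one prepended zero lowers the remaining pad by 1
theorem pv_pad_succ (m n : Nat) (hm : m ≠ 0) (hr : n % m ≠ 0) :
    (m - n % m) % m = (m - (n + 1) % m) % m + 1 := by
  have h1 : n % m < m := Nat.mod_lt _ (Nat.pos_of_ne_zero hm)
  have h0 : n % m ≠ 0 := hr
  have hm2 : 2 ≤ m := by
    by_contra h
    have hm1 : m = 1 := by omega
    rw [hm1, Nat.mod_one] at hr
    exact hr rfl
  have h2 : (n + 1) % m = (n % m + 1) % m := by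
    conv_lhs => rw [Nat.add_mod]
    rw [Nat.mod_eq_of_lt (by omega : 1 < m)]
  have h5 : (m - n % m) % m = m - n % m := Nat.mod_eq_of_lt (by omega)
  rcases Nat.lt_or_ge (n % m + 1) m with h3 | h3
  · have h6 : (n % m + 1) % m = n % m + 1 := Nat.mod_eq_of_lt h3
    have h7 : (m - (n % m + 1)) % m = m - (n % m + 1) := Nat.mod_eq_of_lt (by omega)
    rw [h2, h6, h5, h7]
    omega
  · have h4 : n % m + 1 = m := by omega
    rw [h2, h4, Nat.mod_self, Nat.sub_zero, Nat.mod_self, h5]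
    omega

-- A's first while loop: prepend '0' until the length is a multiple of m (guard m = 0 for totality;
-- Python raises ZeroDivisionError there, excluded by Pre_)
def padLoop (m : Nat) (s : List Char) : List Char :=
  if m = 0 then s
  else if s.length % m = 0 then s
  else padLoop m ('0' :: s)
  termination_by (m - s.length % m) % m
  decreasing_by
    rename_i hm hr
    simp only [List.length_cons]
    have := pv_pad_succ m s.length hm hr
    omega

-- A's second while loop: prepend '0' until the length reaches t (the loop condition 'len ≠ len'
-- is run only with |afterxor| ≤ t, where it is 'len < t'; the port uses < for totality)
def padTo (t : Nat) (s : List Char) : List Char :=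
  if s.length < t then padTo t ('0' :: s) else s
  termination_by t - s.length
  decreasing_by simp only [List.length_cons]; omega

def xor_mes (inpstr : String) (key : String) : String :=
  let k := key.toList
  let s := padLoop k.length inpstr.toList
  -- int(len(s)/len(key)) * key: the quotient is exact (len(s) is a multiple of len(key)),
  -- so Nat division ports the float division exactly
  let keyRep := (List.replicate (s.length / k.length) k).flatten
  let afterxor := toBin (intBin s ^^^ intBin keyRep)
  String.ofList (padTo s.length afterxor)

-- ===== PORT B =====

-- '1' if b != k else '0'
def xorc (b k : Char) : Char := if b ≠ k then '1' else '0'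

def xor_mes_alt (inpstr : String) (key : String) : String :=
  -- the two 'raise ValueError' guards of Source B; "" stands for the raise (excluded by Pre_)
  if inpstr.toList = [] ∨ key.toList = [] then ""
  else if (inpstr.toList.any (fun c => ¬ (c = '0' ∨ c = '1'))) ∨
          (key.toList.any (fun c => ¬ (c = '0' ∨ c = '1'))) then ""
  else
    let m := key.toList.length
    -- -len(inpstr) % len(key): for m > 0 Python's value is (m - n % m) % m
    let bits := List.replicate ((m - inpstr.toList.length % m) % m) '0' ++ inpstr.toList
    let rep := (List.replicate (bits.length / m) key.toList).flatten
    String.ofList (List.zipWith xorc bits rep)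

-- ===== PRECONDITION & SPEC =====
-- Pre_ excludes empty strings, on which A raises (ValueError from int('',2), or
-- ZeroDivisionError on an empty key), and strings containing any character other than
-- '0'/'1': there int(_,2)'s literal grammar makes A raise ValueError or return a value that
-- is an accident of that grammar (accepted '+', '0b', underscores, whitespace; a '-' sign can
-- even leave a 'b' in A's output), while B raises ValueError.
def Pre_xor_mes (inpstr : String) (key : String) : Prop :=
  (!inpstr.toList.isEmpty && !key.toList.isEmpty
   && inpstr.toList.all (fun c => c == '0' || c == '1')
   && key.toList.all (fun c => c == '0' || c == '1')) = true
instance (inpstr : String) (key : String) : Decidable (Pre_xor_mes inpstr key) := by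
  unfold Pre_xor_mes; infer_instance

def pvWitness_xor_mes : String × String := ("1011", "101")

def Spec_xor_mes (inpstr : String) (key : String) (out : String) : Prop := out = xor_mes_alt inpstr key
instance (inpstr : String) (key : String) (out : String) : Decidable (Spec_xor_mes inpstr key out) := by
  unfold Spec_xor_mes; infer_instance

-- ===== CLAIM (what is proved, stated in full; the proofs are below) =====
def Claim_equal_xor_mes : Prop := ∀ (inpstr : String) (key : String), Dom_xor_mes inpstr key → Pre_xor_mes inpstr key → Spec_xor_mes inpstr key (xor_mes inpstr key)

-- ===== LEMMAS AND PROOFS =====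

def pvBin (c : Char) : Prop := c = '0' ∨ c = '1'

theorem parseBin_nil : parseBin [] = 0 := rfl

theorem parseBin_foldl (a : Nat) (s : List Char) :
    s.foldl (fun a c => 2 * a + (if c = '1' then 1 else 0)) a = a * 2 ^ s.length + parseBin s := by
  induction s generalizing a with
  | nil => simp [parseBin]
  | cons c t ih =>
    simp only [List.foldl_cons, List.length_cons, parseBin] at *
    rw [ih (2 * a + _), ih (2 * 0 + _)]
    ring

theorem parseBin_cons (c : Char) (s : List Char) :
    parseBin (c :: s) = (if c = '1' then 1 else 0) * 2 ^ s.length + parseBin s := by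
  show List.foldl _ _ _ = _
  rw [List.foldl_cons, parseBin_foldl]
  norm_num

theorem parseBin_lt (s : List Char) : parseBin s < 2 ^ s.length := by
  induction s with
  | nil => simp [parseBin]
  | cons c t ih =>
    rw [parseBin_cons, List.length_cons, pow_succ]
    split <;> omega

theorem parseBin_inj (s t : List Char) (hs : ∀ c ∈ s, pvBin c) (ht : ∀ c ∈ t, pvBin c)
    (hlen : s.length = t.length) (h : parseBin s = parseBin t) : s = t := by
  induction s generalizing t with
  | nil => cases t <;> simp_all
  | cons a s ih =>
    cases t with
    | nil => simp at hlen
    | cons b t =>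
      simp only [List.length_cons, Nat.add_right_cancel_iff] at hlen
      rw [parseBin_cons, parseBin_cons, hlen] at h
      have h1 := parseBin_lt s
      have h2 := parseBin_lt t
      rw [hlen] at h1
      have hab : (if a = '1' then 1 else 0) = (if b = '1' then (1:Nat) else 0) ∧
          parseBin s = parseBin t := by
        split_ifs at h ⊢ <;> omega
      have ha := hs a (by simp)
      have hb := ht b (by simp)
      have hch : a = b := by
        rcases ha with rfl | rfl <;> rcases hb with rfl | rfl <;> simp_all
      rw [hch, ih t (fun c hc => hs c (List.mem_cons_of_mem _ hc))
        (fun c hc => ht c (List.mem_cons_of_mem _ hc)) hlen hab.2]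

theorem xor_split {n : Nat} (u v x y : Nat) (hx : x < 2 ^ n) (hy : y < 2 ^ n) :
    (u * 2 ^ n + x) ^^^ (v * 2 ^ n + y) = (u ^^^ v) * 2 ^ n + (x ^^^ y) := by
  apply Nat.eq_of_testBit_eq
  intro i
  rw [mul_comm u, mul_comm v, mul_comm (u ^^^ v), Nat.testBit_xor,
    Nat.testBit_two_pow_mul_add u hx i, Nat.testBit_two_pow_mul_add v hy i,
    Nat.testBit_two_pow_mul_add (u ^^^ v) (Nat.xor_lt_two_pow hx hy) i]
  split
  · rw [Nat.testBit_xor]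
  · rw [Nat.testBit_xor]

theorem parseBin_zipWith (a b : List Char) (ha : ∀ c ∈ a, pvBin c) (hb : ∀ c ∈ b, pvBin c)
    (hlen : a.length = b.length) :
    parseBin (List.zipWith xorc a b) = parseBin a ^^^ parseBin b := by
  induction a generalizing b with
  | nil => cases b <;> simp_all [parseBin]
  | cons x s ih =>
    cases b with
    | nil => simp at hlen
    | cons y t =>
      simp only [List.length_cons, Nat.add_right_cancel_iff] at hlen
      have hzlen : (List.zipWith xorc s t).length = s.length := by
        rw [List.length_zipWith]; omega
      rw [List.zipWith_cons_cons, parseBin_cons, parseBin_cons, parseBin_cons, hzlen, hlen,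
        ih t (fun c hc => ha c (List.mem_cons_of_mem _ hc))
          (fun c hc => hb c (List.mem_cons_of_mem _ hc)) hlen,
        xor_split _ _ _ _ (by rw [← hlen]; exact parseBin_lt s) (parseBin_lt t)]
      have hx := ha x (by simp)
      have hy := hb y (by simp)
      congr 2
      rcases hx with rfl | rfl <;> rcases hy with rfl | rfl <;> simp [xorc]

theorem zipWith_xorc_bin (a b : List Char) : ∀ c ∈ List.zipWith xorc a b, pvBin c := by
  intro c hc
  rw [List.mem_iff_getElem] at hc
  obtain ⟨i, hi, rfl⟩ := hc
  rw [List.getElem_zipWith]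
  unfold xorc pvBin
  split <;> simp

theorem toBinAux_parse (n : Nat) : ∀ acc : List Char,
    parseBin (toBinAux n acc) = n * 2 ^ acc.length + parseBin acc := by
  induction n using Nat.strong_induction_on with
  | _ n ih =>
    intro acc
    rw [toBinAux]
    by_cases h : n = 0
    · subst h; simp
    · rw [if_neg h, ih (n / 2) (Nat.div_lt_self (Nat.pos_of_ne_zero h) (by norm_num)),
        parseBin_cons, List.length_cons, pow_succ]
      have h2 : (if (if n % 2 = 1 then '1' else '0') = '1' then (1:Nat) else 0) = n % 2 := by
        rcases Nat.mod_two_eq_zero_or_one n with h | h <;> simp [h]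
      rw [h2]
      have hnd := Nat.div_add_mod n 2
      conv_rhs => rw [← hnd]
      ring

theorem toBinAux_bin (n : Nat) : ∀ acc : List Char, (∀ c ∈ acc, pvBin c) →
    ∀ c ∈ toBinAux n acc, pvBin c := by
  induction n using Nat.strong_induction_on with
  | _ n ih =>
    intro acc hacc
    rw [toBinAux]
    by_cases h : n = 0
    · rw [if_pos h]; exact hacc
    · rw [if_neg h]
      apply ih (n / 2) (Nat.div_lt_self (Nat.pos_of_ne_zero h) (by norm_num))
      intro c hc
      rcases hc with _ | hc
      · unfold pvBin; split <;> simp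
      · exact hacc c (by assumption)

theorem toBinAux_length (n : Nat) : ∀ (acc : List Char) (j : Nat), n < 2 ^ j →
    (toBinAux n acc).length ≤ j + acc.length := by
  induction n using Nat.strong_induction_on with
  | _ n ih =>
    intro acc j hj
    rw [toBinAux]
    by_cases h : n = 0
    · rw [if_pos h]; omega
    · rw [if_neg h]
      have hn : 0 < n := Nat.pos_of_ne_zero h
      have hj1 : 1 ≤ j := by
        by_contra hc
        have hj0 : j = 0 := by omega
        subst hj0
        norm_num at hj
        omega
      have hdiv : n / 2 < 2 ^ (j - 1) := by
        have hpow : 2 ^ j = 2 * 2 ^ (j - 1) := by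
          rw [← pow_succ']
          congr 1
          omega
        omega
      have := ih (n / 2) (Nat.div_lt_self hn (by norm_num)) ((if n % 2 = 1 then '1' else '0') :: acc) (j - 1) hdiv
      simp only [List.length_cons] at this
      omega

theorem toBin_parse (n : Nat) : parseBin (toBin n) = n := by
  unfold toBin
  split
  · rw [parseBin_cons]; simp [parseBin_nil, *]
  · rw [toBinAux_parse]; simp [parseBin_nil]

theorem toBin_bin (n : Nat) : ∀ c ∈ toBin n, pvBin c := by
  unfold toBin
  split
  · intro c hc; simp at hc; simp [pvBin, hc]
  · exact toBinAux_bin n [] (by simp)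

theorem toBin_length_le (n j : Nat) (hj : 1 ≤ j) (h : n < 2 ^ j) : (toBin n).length ≤ j := by
  unfold toBin
  split
  · simpa using hj
  · have := toBinAux_length n [] j h
    simpa using this

theorem padTo_length (t : Nat) (s : List Char) : (padTo t s).length = max t s.length := by
  fun_induction padTo t s with
  | case1 s h ih => rw [ih]; simp only [List.length_cons]; omega
  | case2 s h => omega

theorem padTo_parse (t : Nat) (s : List Char) : parseBin (padTo t s) = parseBin s := by
  fun_induction padTo t s with
  | case1 s h ih => rw [ih, parseBin_cons]; simp
  | case2 s h => rfl

theorem padTo_bin (t : Nat) (s : List Char) (hs : ∀ c ∈ s, pvBin c) :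
    ∀ c ∈ padTo t s, pvBin c := by
  fun_induction padTo t s with
  | case1 s h ih =>
    apply ih
    intro c hc
    rcases hc with _ | hc
    · simp [pvBin]
    · exact hs c (by assumption)
  | case2 s h => exact hs

theorem padLoop_eq (m : Nat) (s : List Char) (hm : m ≠ 0) :
    padLoop m s = List.replicate ((m - s.length % m) % m) '0' ++ s := by
  fun_induction padLoop m s with
  | case1 s h => omega
  | case2 s hm0 h =>
    rw [h]
    simp
  | case3 s hm0 hr ih =>
    rw [ih]
    have key := pv_pad_succ m s.length hm hr
    simp only [List.length_cons]
    rw [key, List.replicate_succ', List.append_assoc, List.singleton_append]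

theorem flatten_replicate_length {α : Type} (q : Nat) (k : List α) :
    ((List.replicate q k).flatten).length = q * k.length := by
  induction q with
  | zero => simp
  | succ p ih => rw [List.replicate_succ, List.flatten_cons, List.length_append, ih]; ring

-- on a nonempty all-binary string, int(s, 2)'s grammar accepts exactly the digits themselves
theorem digitsCore_binary_tt (s : List Char) (hb : ∀ c ∈ s, pvBin c) :
    digitsCore s true true = some s := by
  induction s with
  | nil => rfl
  | cons c t ih =>
    have hc : c = '0' ∨ c = '1' := hb c (by simp)
    unfold digitsCore
    rw [if_pos hc, ih (fun x hx => hb x (List.mem_cons_of_mem _ hx))]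
    rfl

theorem stripWS_binary (s : List Char) (hb : ∀ c ∈ s, pvBin c) : stripWS s = s := by
  have hdrop : ∀ t : List Char, (∀ c ∈ t, pvBin c) → t.dropWhile pvIsWS = t := by
    intro t ht
    cases t with
    | nil => rfl
    | cons c u =>
      rw [List.dropWhile_cons_of_neg]
      rcases ht c (by simp) with rfl | rfl <;> simp [pvIsWS]
  unfold stripWS
  rw [hdrop s hb, hdrop s.reverse (fun c hc => hb c (List.mem_reverse.mp hc)),
    List.reverse_reverse]

theorem pvDigits?_binary (s : List Char) (hne : s ≠ []) (hb : ∀ c ∈ s, pvBin c) :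
    pvDigits? s = some s := by
  unfold pvDigits?
  rw [stripWS_binary s hb]
  have hhead : s.head? ≠ some '+' := by
    cases s with
    | nil => simp
    | cons c t =>
      rcases hb c (by simp) with rfl | rfl <;> simp
  rw [if_neg hhead]
  unfold pvDigitsAux
  have hpre : ¬ (s.take 2 = ['0', 'b'] ∨ s.take 2 = ['0', 'B']) := by
    intro h
    have hbmem : 'b' ∈ s ∨ 'B' ∈ s := by
      rcases h with h | h
      · left; exact List.mem_of_mem_take (h ▸ (by simp : 'b' ∈ (['0','b'] : List Char)))
      · right; exact List.mem_of_mem_take (h ▸ (by simp : 'B' ∈ (['0','B'] : List Char)))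
    rcases hbmem with h | h <;> rcases hb _ h with h' | h' <;> simp at h'
  rw [if_neg hpre]
  cases s with
  | nil => exact absurd rfl hne
  | cons c t =>
    have hc : c = '0' ∨ c = '1' := hb c (by simp)
    unfold digitsCore
    rw [if_pos hc, digitsCore_binary_tt t (fun x hx => hb x (List.mem_cons_of_mem _ hx))]
    rfl

theorem pad_makes_multiple (m n : Nat) (hm : m ≠ 0) : ((m - n % m) % m + n) % m = 0 := by
  have hmpos : 0 < m := Nat.pos_of_ne_zero hm
  have h1 : n % m < m := Nat.mod_lt _ hmpos
  rcases eq_or_ne (n % m) 0 with h | h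
  · rw [h, Nat.sub_zero, Nat.mod_self, Nat.zero_add, h]
  · have h5 : (m - n % m) % m = m - n % m := Nat.mod_eq_of_lt (by omega)
    have hsum : m - n % m + n % m = m := by omega
    rw [h5, Nat.add_mod, h5, hsum, Nat.mod_self]

-- ===== VERDICT (by name: the statement is the Claim_ definition above) =====
theorem xor_mes_spec : Claim_equal_xor_mes := by
  intro inpstr key _ hpre
  simp only [Pre_xor_mes, Bool.and_eq_true, Bool.not_eq_true', List.isEmpty_eq_false_iff,
    List.all_eq_true, Bool.or_eq_true, beq_iff_eq] at hpre
  obtain ⟨⟨⟨hine, hkne⟩, hibin⟩, hkbin⟩ := hpre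
  have hm : key.toList.length ≠ 0 := by simpa using hkne
  unfold Spec_xor_mes
  simp only [xor_mes, xor_mes_alt]
  rw [if_neg (by simp [hine, hkne]), if_neg (by
    simp only [List.any_eq_true, decide_eq_true_eq, not_or, not_exists, not_and, not_not]
    exact ⟨fun c hc h0 => (hibin c hc).resolve_left h0,
           fun c hc h0 => (hkbin c hc).resolve_left h0⟩)]
  rw [padLoop_eq _ _ hm]
  set m := key.toList.length with hmdef
  set P := List.replicate ((m - inpstr.toList.length % m) % m) '0' ++ inpstr.toList with hP
  set R := (List.replicate (P.length / m) key.toList).flatten with hR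
  have hPbin : ∀ c ∈ P, pvBin c := by
    intro c hc
    rcases List.mem_append.mp hc with h | h
    · rw [List.eq_of_mem_replicate h]; simp [pvBin]
    · exact hibin c h
  have hRbin : ∀ c ∈ R, pvBin c := by
    intro c hc
    obtain ⟨l, hl, hcl⟩ := List.mem_flatten.mp hc
    rw [List.eq_of_mem_replicate hl] at hcl
    exact hkbin c hcl
  have hPne : P ≠ [] := by
    rw [hP]
    intro h
    rw [List.append_eq_nil_iff] at h
    exact hine h.2
  have hPlen : P.length % m = 0 := by
    rw [hP, List.length_append, List.length_replicate]
    exact pad_makes_multiple m inpstr.toList.length hm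
  have hRlen : R.length = P.length := by
    rw [hR, flatten_replicate_length, ← hmdef, Nat.div_mul_cancel (Nat.dvd_of_mod_eq_zero hPlen)]
  simp only [intBin, pvDigits?_binary P hPne hPbin]
  have hRne : R ≠ [] := fun h =>
    hPne (List.length_eq_zero_iff.mp (by rw [← hRlen, h]; rfl))
  rw [pvDigits?_binary R hRne hRbin]
  set n := P.length with hn
  have hn1 : 1 ≤ n := by
    rcases P with _ | ⟨c, t⟩
    · exact absurd rfl hPne
    · simp [hn]
  have haval : parseBin P < 2 ^ n := parseBin_lt P
  have hbval : parseBin R < 2 ^ n := by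
    have := parseBin_lt R
    rwa [hRlen] at this
  set x := parseBin P ^^^ parseBin R with hx
  have hxlt : x < 2 ^ n := Nat.xor_lt_two_pow haval hbval
  have htblen : (toBin x).length ≤ n := toBin_length_le x n hn1 hxlt
  congr 1
  apply parseBin_inj
  · exact padTo_bin _ _ (toBin_bin x)
  · exact zipWith_xorc_bin P R
  · rw [padTo_length, List.length_zipWith, hRlen]
    omega
  · rw [padTo_parse, toBin_parse,
      parseBin_zipWith P R hPbin hRbin hRlen.symm]
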